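-- pv_equiv track=rewrite | github.com/suzuki-akira3/TDM | abbreviation/modules/.ipynb_checkpoints/convertdic-checkpoint.py | concat_dic
-- ===== SOURCE A (Python) =====
-- def concat_dic(dica, dicb):
--     keysa = dica.keys()
--     keysb = dicb.keys()
--     new_keys = sorted(set(list(keysa) + list(keysb)))
--     new_dic = {}
--     for k in new_keys:
--         new_values = []
--         if dica.get(k):
--             new_values.extend(dica[k])
--         if dicb.get(k):
--             new_values.extend(dicb[k])
--
--         new_dic[k] = list(sorted(set(new_values)))
--
--     return new_dic
-- ===== SOURCE B (Python) =====
-- def concat_dic(dica, dicb):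
--     # Two-pointer merge of the two item lists sorted by key (no key-union set,
--     # no per-key dict lookups).
--     a = sorted(dica.items(), key=lambda kv: kv[0])
--     b = sorted(dicb.items(), key=lambda kv: kv[0])
--     out = {}
--     i = j = 0
--     while i < len(a) and j < len(b):
--         (ka, va), (kb, vb) = a[i], b[j]
--         if ka < kb:
--             out[ka] = sorted(set(va))
--             i += 1
--         elif kb < ka:
--             out[kb] = sorted(set(vb))
--             j += 1
--         else:
--             out[ka] = sorted(set(va + vb))
--             i += 1
--             j += 1
--     for k, v in a[i:] + b[j:]:
--         out[k] = sorted(set(v))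
--     return out
-- ===== Notes on version B (the rewrite author's own statement) =====
-- stated objective: alternative
-- what changed: A unions the key sets, sorts them, and does paired dict lookups per key; B instead sorts each dict's item list by key once and runs a classic two-pointer merge over the two sorted lists (combining values when the heads' keys are equal), with no key-union set and no per-key lookups.
import Mathlib
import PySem

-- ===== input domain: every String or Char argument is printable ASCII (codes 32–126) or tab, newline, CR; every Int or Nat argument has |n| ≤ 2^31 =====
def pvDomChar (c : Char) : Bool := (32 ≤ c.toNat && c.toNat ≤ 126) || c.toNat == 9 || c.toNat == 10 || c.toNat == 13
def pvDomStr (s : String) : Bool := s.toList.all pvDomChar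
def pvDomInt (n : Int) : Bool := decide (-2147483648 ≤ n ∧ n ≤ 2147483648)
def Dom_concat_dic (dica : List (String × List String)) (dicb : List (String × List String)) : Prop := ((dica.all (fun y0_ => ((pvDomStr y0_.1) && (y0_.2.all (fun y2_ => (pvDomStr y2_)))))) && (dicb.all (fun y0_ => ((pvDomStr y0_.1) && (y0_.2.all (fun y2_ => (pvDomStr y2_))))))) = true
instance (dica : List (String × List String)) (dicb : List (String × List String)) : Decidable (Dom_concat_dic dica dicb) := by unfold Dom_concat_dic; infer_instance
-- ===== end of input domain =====

-- B replaces A's sorted-key-union loop with paired dict lookups by sorting each dict's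
-- item list by key and running a two-pointer merge of the two sorted lists (alternative algorithm).


-- ===== PORT A =====
def concat_dic (dica : List (String × List String)) (dicb : List (String × List String)) : List (String × List String) :=
  let da := PySem.Dict.mk dica
  let db := PySem.Dict.mk dicb
  let keysa := da.keys
  let keysb := db.keys
  let new_keys := PySem.List.sorted (PySem.Set.ofList (keysa ++ keysb)) (fun k => k) false
  let new_dic : PySem.Dict String (List String) :=
    new_keys.foldl (fun nd k =>
      let new_values : List String := []
      -- `if dica.get(k):` — truthy iff present with a nonempty list; then extend with dica[k]
      let new_values := if (da.get? k).getD [] ≠ [] then new_values ++ da.getD k [] else new_values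
      let new_values := if (db.get? k).getD [] ≠ [] then new_values ++ db.getD k [] else new_values
      nd.insert k (PySem.List.sorted (PySem.Set.ofList new_values) (fun v => v) false))
      PySem.Dict.empty
  new_dic.items

-- ===== PORT B =====
-- `sorted(set(v))`
def pvSortedSet (v : List String) : List String :=
  PySem.List.sorted (PySem.Set.ofList v) (fun x => x) false

-- the `while i < len(a) and j < len(b)` two-pointer loop followed by the
-- leftover pass `for k, v in a[i:] + b[j:]` (indices i, j ↔ consuming the lists)
def pvMerge : List (String × List String) → List (String × List String) →
    PySem.Dict String (List String) → PySem.Dict String (List String)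
  | [], b, out => b.foldl (fun o kv => o.insert kv.1 (pvSortedSet kv.2)) out
  | a :: as, [], out => ((a :: as).foldl (fun o kv => o.insert kv.1 (pvSortedSet kv.2)) out)
  | (ka, va) :: as, (kb, vb) :: bs, out =>
    if ka < kb then pvMerge as ((kb, vb) :: bs) (out.insert ka (pvSortedSet va))
    else if kb < ka then pvMerge ((ka, va) :: as) bs (out.insert kb (pvSortedSet vb))
    else pvMerge as bs (out.insert ka (pvSortedSet (va ++ vb)))
  termination_by a b _ => a.length + b.length

def concat_dic_alt (dica : List (String × List String)) (dicb : List (String × List String)) : List (String × List String) :=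
  let a := PySem.List.sorted (PySem.Dict.mk dica).items (fun kv => kv.1) false
  let b := PySem.List.sorted (PySem.Dict.mk dicb).items (fun kv => kv.1) false
  (pvMerge a b PySem.Dict.empty).items

-- ===== PRECONDITION & SPEC =====
-- Pre_ requires each association list to have distinct keys: a Python dict cannot contain
-- duplicate keys, so duplicate-key lists have no faithful Python counterpart (first-match
-- lookup in the list model vs last-wins collapse when a dict is built).
def Pre_concat_dic (dica : List (String × List String)) (dicb : List (String × List String)) : Prop :=
  (dica.map Prod.fst).Nodup ∧ (dicb.map Prod.fst).Nodup
instance (dica : List (String × List String)) (dicb : List (String × List String)) : Decidable (Pre_concat_dic dica dicb) := by unfold Pre_concat_dic; infer_instance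
def pvWitness_concat_dic : (List (String × List String)) × (List (String × List String)) :=
  ([("a", ["y", "x"]), ("b", [])], [("a", ["z"]), ("c", ["w"])])

def Spec_concat_dic (dica : List (String × List String)) (dicb : List (String × List String)) (out : List (String × List String)) : Prop := out = concat_dic_alt dica dicb
instance (dica : List (String × List String)) (dicb : List (String × List String)) (out : List (String × List String)) : Decidable (Spec_concat_dic dica dicb out) := by unfold Spec_concat_dic; infer_instance

-- ===== CLAIM (what is proved, stated in full; the proofs are below) =====
def Claim_equal_concat_dic : Prop := ∀ (dica : List (String × List String)) (dicb : List (String × List String)), Dom_concat_dic dica dicb → Pre_concat_dic dica dicb → Spec_concat_dic dica dicb (concat_dic dica dicb)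

-- ===== LEMMAS AND PROOFS =====

-- Python-dict lookup (with default []) in the association-list model
def pvLk (s : List (String × List String)) (k : String) : List String :=
  ((PySem.Dict.mk s).get? k).getD []

-- the pure-list version of the merge loop (proof scaffolding only)
def pvMergeItems : List (String × List String) → List (String × List String) →
    List (String × List String)
  | [], b => b.map (fun kv => (kv.1, pvSortedSet kv.2))
  | a :: as, [] => (a :: as).map (fun kv => (kv.1, pvSortedSet kv.2))
  | (ka, va) :: as, (kb, vb) :: bs =>
    if ka < kb then (ka, pvSortedSet va) :: pvMergeItems as ((kb, vb) :: bs)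
    else if kb < ka then (kb, pvSortedSet vb) :: pvMergeItems ((ka, va) :: as) bs
    else (ka, pvSortedSet (va ++ vb)) :: pvMergeItems as bs
  termination_by a b => a.length + b.length

-- strict key order from weak key order plus distinct keys
theorem pairwise_lt_of_le_nodup (l : List (String × List String))
    (hle : l.Pairwise (fun p q => p.1 ≤ q.1)) (hnd : (l.map Prod.fst).Nodup) :
    l.Pairwise (fun p q => p.1 < q.1) := by
  induction l with
  | nil => simp
  | cons x t ih =>
    simp only [List.map_cons, List.nodup_cons] at hnd
    rcases hle with _ | ⟨hx, ht⟩
    refine List.Pairwise.cons (fun q hq => ?_) (ih ht hnd.2)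
    exact lt_of_le_of_ne (hx q hq) (fun he => hnd.1 (he ▸ List.mem_map.mpr ⟨q, hq, rfl⟩))

theorem pvLk_not_mem (s : List (String × List String)) (k : String)
    (h : k ∉ s.map Prod.fst) : pvLk s k = [] := by
  unfold pvLk
  rw [(PySem.Dict.get?_eq_none_iff_not_mem_keys (PySem.Dict.mk s) k).mpr (by simpa [PySem.Dict.keys] using h)]
  rfl

theorem pvLk_mem (s : List (String × List String)) (kv : String × List String)
    (hmem : kv ∈ s) (hnd : (s.map Prod.fst).Nodup) : pvLk s kv.1 = kv.2 := by
  unfold pvLk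
  rw [PySem.Dict.get?_of_mem_items (PySem.Dict.mk s) (k := kv.1) (v := kv.2) hmem
    (by simpa [PySem.Dict.keys] using hnd)]
  rfl

theorem pvLk_cons_ne (p : String × List String) (s : List (String × List String)) (k : String)
    (h : p.1 ≠ k) : pvLk (p :: s) k = pvLk s k := by
  unfold pvLk
  have : PySem.Dict.mk (p :: s) = { items := (p.1, p.2) :: s } := rfl
  rw [this, PySem.Dict.get?_mk_cons]
  simp [h]

theorem pvLk_perm (s t : List (String × List String)) (hper : s.Perm t)
    (hnd : (t.map Prod.fst).Nodup) (k : String) : pvLk s k = pvLk t k := by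
  have hnds : (s.map Prod.fst).Nodup := ((hper.map Prod.fst).nodup_iff).mpr hnd
  by_cases hm : k ∈ t.map Prod.fst
  · obtain ⟨p, hp, hpk⟩ := List.mem_map.mp hm
    rw [show k = p.1 from hpk.symm, pvLk_mem t p hp hnd,
      pvLk_mem s p (hper.mem_iff.mpr hp) hnds]
  · rw [pvLk_not_mem t k hm, pvLk_not_mem s k (fun hc => hm ((hper.map Prod.fst).mem_iff.mp hc))]

-- sorted(set(l)) is determined by l's members
theorem sortedSet_congr_mem (l l' : List String) (h : ∀ x, x ∈ l ↔ x ∈ l') :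
    PySem.List.sorted (PySem.Set.ofList l) (fun k => k) false
      = PySem.List.sorted (PySem.Set.ofList l') (fun k => k) false := by
  refine PySem.List.sorted_eq_of_perm_of_pairwise_lt _ _ _ ?_ (PySem.List.sorted_ofList_pairwise_lt l')
  refine (PySem.List.sorted_perm (PySem.Set.ofList l') (fun k => k) false).trans ?_
  refine (List.perm_ext_iff_of_nodup (PySem.Set.nodup_ofList l') (PySem.Set.nodup_ofList l)).mpr ?_
  intro x
  simp [PySem.Set.mem_ofList, h]

-- peeling the minimal key off sorted(set(l))
theorem sortedSet_cons (l : List String) (k : String) (rest : List String)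
    (hmem : ∀ x, x ∈ l ↔ x = k ∨ x ∈ rest) (hlt : ∀ x ∈ rest, k < x) :
    PySem.List.sorted (PySem.Set.ofList l) (fun x => x) false
      = k :: PySem.List.sorted (PySem.Set.ofList rest) (fun x => x) false := by
  refine PySem.List.sorted_eq_of_perm_of_pairwise_lt _ _ _ ?_ ?_
  · refine (List.perm_ext_iff_of_nodup ?_ (PySem.Set.nodup_ofList l)).mpr ?_
    · refine List.nodup_cons.mpr ⟨?_, ((PySem.List.sorted_perm _ _ _).nodup_iff).mpr (PySem.Set.nodup_ofList rest)⟩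
      intro hk
      have hkr : k ∈ rest := by
        simpa [PySem.List.mem_sorted, PySem.Set.mem_ofList] using hk
      exact lt_irrefl k (hlt k hkr)
    · intro x
      simp only [List.mem_cons, PySem.List.mem_sorted, PySem.Set.mem_ofList]
      exact (hmem x).symm
  · refine List.Pairwise.cons (fun y hy => ?_) (PySem.List.sorted_ofList_pairwise_lt rest)
    exact hlt y (by simpa [PySem.List.mem_sorted, PySem.Set.mem_ofList] using hy)

-- distinct keys from strict key order
theorem keys_nodup_of_pairwise_lt (l : List (String × List String))
    (h : l.Pairwise (fun p q => p.1 < q.1)) : (l.map Prod.fst).Nodup :=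
  List.pairwise_map.mpr (h.imp fun hl => ne_of_lt hl)

theorem pvLk_cons_self (k : String) (v : List String) (s : List (String × List String)) :
    pvLk ((k, v) :: s) k = v := by
  unfold pvLk
  have h : PySem.Dict.mk ((k, v) :: s) = { items := (k, v) :: s } := rfl
  rw [h, PySem.Dict.get?_mk_cons]
  simp

-- the merge loop appends the pure merge to the accumulator dict
theorem pvMerge_items : ∀ (sa sb : List (String × List String))
    (out : PySem.Dict String (List String)),
    sa.Pairwise (fun p q => p.1 < q.1) → sb.Pairwise (fun p q => p.1 < q.1) →
    (∀ k ∈ sa.map Prod.fst ++ sb.map Prod.fst, out.contains k = false) →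
    (pvMerge sa sb out).items = out.items ++ pvMergeItems sa sb
  | [], b, out, _, hb, hout => by
    rw [pvMerge, pvMergeItems]
    refine PySem.Dict.items_foldl_insert_fresh b (fun kv => kv.1) (fun kv => pvSortedSet kv.2) out
      (fun a hamem => hout a.1 ?_) (keys_nodup_of_pairwise_lt b hb)
    exact List.mem_append_right _ (List.mem_map.mpr ⟨a, hamem, rfl⟩)
  | a :: as, [], out, ha, _, hout => by
    rw [pvMerge, pvMergeItems]
    refine PySem.Dict.items_foldl_insert_fresh (a :: as) (fun kv => kv.1) (fun kv => pvSortedSet kv.2) out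
      (fun p hpmem => hout p.1 ?_) (keys_nodup_of_pairwise_lt (a :: as) ha)
    exact List.mem_append_left _ (List.mem_map.mpr ⟨p, hpmem, rfl⟩)
  | (ka, va) :: as, (kb, vb) :: bs, out, ha, hb, hout => by
    obtain ⟨hka, ha'⟩ := List.pairwise_cons.mp ha
    obtain ⟨hkb, hb'⟩ := List.pairwise_cons.mp hb
    have houtka : out.contains ka = false := hout ka (by simp)
    have houtkb : out.contains kb = false := hout kb (by simp)
    rw [pvMerge, pvMergeItems]
    by_cases h1 : ka < kb
    · simp only [h1, if_true]
      rw [pvMerge_items as ((kb, vb) :: bs) _ ha' hb ?fresh,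
        PySem.Dict.items_insert_of_not_contains out _ houtka, List.append_assoc, List.singleton_append]
      case fresh =>
        intro k hk
        rw [PySem.Dict.contains_insert]
        have hgt : ka < k := by
          rcases List.mem_append.mp hk with hk | hk
          · obtain ⟨p, hp, rfl⟩ := List.mem_map.mp hk
            exact hka p hp
          · simp only [List.map_cons, List.mem_cons] at hk
            rcases hk with rfl | hk
            · exact h1
            · obtain ⟨p, hp, rfl⟩ := List.mem_map.mp hk
              exact h1.trans (hkb p hp)
        have hne : (k == ka) = false := by simp [ne_of_gt hgt]
        rw [hne, Bool.false_or]
        exact hout k (by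
          rcases List.mem_append.mp hk with hk | hk
          · exact List.mem_append_left _ (by simp [hk])
          · exact List.mem_append_right _ hk)
    · by_cases h2 : kb < ka
      · simp only [h1, if_false, h2, if_true]
        rw [pvMerge_items ((ka, va) :: as) bs _ ha hb' ?fresh,
          PySem.Dict.items_insert_of_not_contains out _ houtkb, List.append_assoc, List.singleton_append]
        case fresh =>
          intro k hk
          rw [PySem.Dict.contains_insert]
          have hgt : kb < k := by
            rcases List.mem_append.mp hk with hk | hk
            · simp only [List.map_cons, List.mem_cons] at hk
              rcases hk with rfl | hk
              · exact h2
              · obtain ⟨p, hp, rfl⟩ := List.mem_map.mp hk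
                exact h2.trans (hka p hp)
            · obtain ⟨p, hp, rfl⟩ := List.mem_map.mp hk
              exact hkb p hp
          have hne : (k == kb) = false := by simp [ne_of_gt hgt]
          rw [hne, Bool.false_or]
          exact hout k (by
            rcases List.mem_append.mp hk with hk | hk
            · exact List.mem_append_left _ hk
            · exact List.mem_append_right _ (by simp [hk]))
      · have hkk : ka = kb := le_antisymm (not_lt.mp h2) (not_lt.mp h1)
        simp only [h1, h2, if_false]
        rw [pvMerge_items as bs _ ha' hb' ?fresh,
          PySem.Dict.items_insert_of_not_contains out _ houtka, List.append_assoc, List.singleton_append]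
        case fresh =>
          intro k hk
          rw [PySem.Dict.contains_insert]
          have hgt : ka < k := by
            rcases List.mem_append.mp hk with hk | hk
            · obtain ⟨p, hp, rfl⟩ := List.mem_map.mp hk
              exact hka p hp
            · obtain ⟨p, hp, rfl⟩ := List.mem_map.mp hk
              exact hkk ▸ hkb p hp
          have hne : (k == ka) = false := by simp [ne_of_gt hgt]
          rw [hne, Bool.false_or]
          exact hout k (by
            rcases List.mem_append.mp hk with hk | hk
            · exact List.mem_append_left _ (by simp [hk])
            · exact List.mem_append_right _ (by simp [hk]))
  termination_by sa sb _ _ _ _ => sa.length + sb.length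


-- the pure merge of two strictly key-sorted lists is A's canonical map
theorem pvMergeItems_canon : ∀ (sa sb : List (String × List String)),
    sa.Pairwise (fun p q => p.1 < q.1) → sb.Pairwise (fun p q => p.1 < q.1) →
    pvMergeItems sa sb
      = (PySem.List.sorted (PySem.Set.ofList (sa.map Prod.fst ++ sb.map Prod.fst)) (fun k => k) false).map
          (fun k => (k, pvSortedSet (pvLk sa k ++ pvLk sb k)))
  | [], b, _, hb => by
    have hnd := keys_nodup_of_pairwise_lt b hb
    rw [pvMergeItems, List.map_nil, List.nil_append, PySem.Set.ofList_eq_self_of_nodup _ hnd,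
      PySem.List.sorted_eq_self_of_pairwise (b.map Prod.fst) (fun k => k)
        (List.pairwise_map.mpr (hb.imp fun h => le_of_lt h)),
      List.map_map]
    refine (List.map_congr_left fun kv hkv => ?_).symm
    have h0 : pvLk [] kv.1 = [] := rfl
    simp only [Function.comp_apply, h0, List.nil_append, pvLk_mem b kv hkv hnd]
  | a :: as, [], ha, _ => by
    have hnd := keys_nodup_of_pairwise_lt (a :: as) ha
    rw [pvMergeItems, List.map_nil, List.append_nil, PySem.Set.ofList_eq_self_of_nodup _ hnd,
      PySem.List.sorted_eq_self_of_pairwise ((a :: as).map Prod.fst) (fun k => k)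
        (List.pairwise_map.mpr (ha.imp fun h => le_of_lt h)),
      List.map_map]
    refine (List.map_congr_left fun kv hkv => ?_).symm
    have h0 : pvLk [] kv.1 = [] := rfl
    simp only [Function.comp_apply, h0, List.append_nil, pvLk_mem (a :: as) kv hkv hnd]
  | (ka, va) :: as, (kb, vb) :: bs, ha, hb => by
    obtain ⟨hka, ha'⟩ := List.pairwise_cons.mp ha
    obtain ⟨hkb, hb'⟩ := List.pairwise_cons.mp hb
    rw [pvMergeItems]
    by_cases h1 : ka < kb
    · simp only [h1, if_true]
      have hlt' : ∀ x ∈ as.map Prod.fst ++ ((kb, vb) :: bs).map Prod.fst, ka < x := by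
        intro x hx
        rcases List.mem_append.mp hx with hx | hx
        · obtain ⟨p, hp, rfl⟩ := List.mem_map.mp hx
          exact hka p hp
        · simp only [List.map_cons, List.mem_cons] at hx
          rcases hx with rfl | hx
          · exact h1
          · obtain ⟨p, hp, rfl⟩ := List.mem_map.mp hx
            exact h1.trans (hkb p hp)
      rw [show ((ka, va) :: as).map Prod.fst ++ ((kb, vb) :: bs).map Prod.fst
            = ka :: (as.map Prod.fst ++ ((kb, vb) :: bs).map Prod.fst) from by simp,
        sortedSet_cons _ ka _ (fun x => List.mem_cons) hlt', List.map_cons]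
      congr 1
      · have hv1 : pvLk ((ka, va) :: as) ka = va := pvLk_cons_self ka va as
        have hv2 : pvLk ((kb, vb) :: bs) ka = [] := by
          refine pvLk_not_mem _ _ (fun hc => ?_)
          exact absurd (hlt' ka (List.mem_append_right _ hc)) (lt_irrefl ka)
        simp only [hv1, hv2, List.append_nil]
      · rw [pvMergeItems_canon as ((kb, vb) :: bs) ha' hb]
        refine List.map_congr_left fun k hk => ?_
        have hgt : ka < k := by
          refine hlt' k ?_
          simpa [PySem.List.mem_sorted, PySem.Set.mem_ofList] using hk
        rw [pvLk_cons_ne (ka, va) as k (ne_of_lt hgt)]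
    · by_cases h2 : kb < ka
      · simp only [h1, if_false, h2, if_true]
        have hlt' : ∀ x ∈ ((ka, va) :: as).map Prod.fst ++ bs.map Prod.fst, kb < x := by
          intro x hx
          rcases List.mem_append.mp hx with hx | hx
          · simp only [List.map_cons, List.mem_cons] at hx
            rcases hx with rfl | hx
            · exact h2
            · obtain ⟨p, hp, rfl⟩ := List.mem_map.mp hx
              exact h2.trans (hka p hp)
          · obtain ⟨p, hp, rfl⟩ := List.mem_map.mp hx
            exact hkb p hp
        have hmem : ∀ x, x ∈ ((ka, va) :: as).map Prod.fst ++ ((kb, vb) :: bs).map Prod.fst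
            ↔ x = kb ∨ x ∈ ((ka, va) :: as).map Prod.fst ++ bs.map Prod.fst := by
          intro x
          simp only [List.map_cons, List.cons_append, List.mem_cons, List.mem_append]
          tauto
        rw [sortedSet_cons _ kb _ hmem hlt', List.map_cons]
        congr 1
        · have hv1 : pvLk ((ka, va) :: as) kb = [] := by
            refine pvLk_not_mem _ _ (fun hc => ?_)
            exact absurd (hlt' kb (List.mem_append_left _ hc)) (lt_irrefl kb)
          have hv2 : pvLk ((kb, vb) :: bs) kb = vb := pvLk_cons_self kb vb bs
          simp only [hv1, hv2, List.nil_append]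
        · rw [pvMergeItems_canon ((ka, va) :: as) bs ha hb']
          refine List.map_congr_left fun k hk => ?_
          have hgt : kb < k := by
            refine hlt' k ?_
            simpa [PySem.List.mem_sorted, PySem.Set.mem_ofList] using hk
          rw [pvLk_cons_ne (kb, vb) bs k (ne_of_lt hgt)]
      · have hkk : ka = kb := le_antisymm (not_lt.mp h2) (not_lt.mp h1)
        subst hkk
        simp only [h1, if_false]
        have hlt' : ∀ x ∈ as.map Prod.fst ++ bs.map Prod.fst, ka < x := by
          intro x hx
          rcases List.mem_append.mp hx with hx | hx
          · obtain ⟨p, hp, rfl⟩ := List.mem_map.mp hx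
            exact hka p hp
          · obtain ⟨p, hp, rfl⟩ := List.mem_map.mp hx
            exact hkb p hp
        have hmem : ∀ x, x ∈ ((ka, va) :: as).map Prod.fst ++ ((ka, vb) :: bs).map Prod.fst
            ↔ x = ka ∨ x ∈ as.map Prod.fst ++ bs.map Prod.fst := by
          intro x
          simp only [List.map_cons, List.cons_append, List.mem_cons, List.mem_append]
          tauto
        rw [sortedSet_cons _ ka _ hmem hlt', List.map_cons]
        congr 1
        · have hv1 : pvLk ((ka, va) :: as) ka = va := pvLk_cons_self ka va as
          have hv2 : pvLk ((ka, vb) :: bs) ka = vb := pvLk_cons_self ka vb bs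
          simp only [hv1, hv2]
        · rw [pvMergeItems_canon as bs ha' hb']
          refine List.map_congr_left fun k hk => ?_
          have hgt : ka < k := by
            refine hlt' k ?_
            simpa [PySem.List.mem_sorted, PySem.Set.mem_ofList] using hk
          rw [pvLk_cons_ne (ka, va) as k (ne_of_lt hgt), pvLk_cons_ne (ka, vb) bs k (ne_of_lt hgt)]
  termination_by sa sb _ _ => sa.length + sb.length

-- A's port in canonical form
theorem concat_dic_canon (dica dicb : List (String × List String)) :
    concat_dic dica dicb
      = (PySem.List.sorted (PySem.Set.ofList (dica.map Prod.fst ++ dicb.map Prod.fst)) (fun k => k) false).map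
          (fun k => (k, pvSortedSet (pvLk dica k ++ pvLk dicb k))) := by
  have heq : concat_dic dica dicb =
      ((PySem.List.sorted (PySem.Set.ofList (dica.map Prod.fst ++ dicb.map Prod.fst)) (fun k => k) false).foldl
        (fun nd k => nd.insert k (PySem.List.sorted (PySem.Set.ofList
            (if ((PySem.Dict.mk dicb).get? k).getD [] ≠ []
             then (if ((PySem.Dict.mk dica).get? k).getD [] ≠ [] then ([] : List String) ++ (PySem.Dict.mk dica).getD k [] else []) ++ (PySem.Dict.mk dicb).getD k []
             else (if ((PySem.Dict.mk dica).get? k).getD [] ≠ [] then ([] : List String) ++ (PySem.Dict.mk dica).getD k [] else [])))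
          (fun v => v) false))
        PySem.Dict.empty).items := rfl
  rw [heq]
  have hnodup : (PySem.List.sorted (PySem.Set.ofList (dica.map Prod.fst ++ dicb.map Prod.fst)) (fun k => k) false).Nodup :=
    ((PySem.List.sorted_perm _ _ _).nodup_iff).mpr (PySem.Set.nodup_ofList _)
  rw [PySem.Dict.items_foldl_insert_fresh _ (fun k => k) _ PySem.Dict.empty
    (by intro a _; rfl) (by simpa using hnodup)]
  simp only [PySem.Dict.empty, List.nil_append]
  apply List.map_congr_left
  intro k _
  by_cases h1 : ((PySem.Dict.mk dica).get? k).getD [] = ([] : List String) <;>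
    by_cases h2 : ((PySem.Dict.mk dicb).get? k).getD [] = ([] : List String) <;>
      simp [pvSortedSet, pvLk, PySem.Dict.getD_eq_get?_getD, h1, h2]

theorem concat_dic_spec : Claim_equal_concat_dic := by
  intro dica dicb _ hpre
  obtain ⟨hna, hnb⟩ := hpre
  unfold Spec_concat_dic
  show concat_dic dica dicb
    = (pvMerge (PySem.List.sorted dica (fun kv => kv.1) false)
        (PySem.List.sorted dicb (fun kv => kv.1) false) PySem.Dict.empty).items
  have hpa : (PySem.List.sorted dica (fun kv : String × List String => kv.1) false).Perm dica :=
    PySem.List.sorted_perm dica _ false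
  have hpb : (PySem.List.sorted dicb (fun kv : String × List String => kv.1) false).Perm dicb :=
    PySem.List.sorted_perm dicb _ false
  have hnda : ((PySem.List.sorted dica (fun kv : String × List String => kv.1) false).map Prod.fst).Nodup :=
    ((hpa.map Prod.fst).nodup_iff).mpr hna
  have hndb : ((PySem.List.sorted dicb (fun kv : String × List String => kv.1) false).map Prod.fst).Nodup :=
    ((hpb.map Prod.fst).nodup_iff).mpr hnb
  have halt : (PySem.List.sorted dica (fun kv : String × List String => kv.1) false).Pairwise (fun p q => p.1 < q.1) :=
    pairwise_lt_of_le_nodup _ (PySem.List.sorted_pairwise dica _) hnda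
  have hblt : (PySem.List.sorted dicb (fun kv : String × List String => kv.1) false).Pairwise (fun p q => p.1 < q.1) :=
    pairwise_lt_of_le_nodup _ (PySem.List.sorted_pairwise dicb _) hndb
  rw [pvMerge_items _ _ _ halt hblt (fun k _ => rfl), pvMergeItems_canon _ _ halt hblt,
    concat_dic_canon]
  have hkeys : PySem.List.sorted (PySem.Set.ofList (dica.map Prod.fst ++ dicb.map Prod.fst)) (fun k => k) false
      = PySem.List.sorted (PySem.Set.ofList
          ((PySem.List.sorted dica (fun kv : String × List String => kv.1) false).map Prod.fst
            ++ (PySem.List.sorted dicb (fun kv : String × List String => kv.1) false).map Prod.fst)) (fun k => k) false := by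
    refine sortedSet_congr_mem _ _ (fun x => ?_)
    simp only [List.mem_append, (hpa.map Prod.fst).mem_iff, (hpb.map Prod.fst).mem_iff]
  rw [hkeys]
  show _ = [] ++ _
  rw [List.nil_append]
  apply List.map_congr_left
  intro k _
  rw [pvLk_perm _ dica hpa hna k, pvLk_perm _ dicb hpb hnb k]
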